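-- pv_equiv track=rewrite | github.com/AlexN235/CMPT-417---Intellegent-Systems | code/mvc.py | combine_check
-- ===== SOURCE A (Python) =====
-- def combine_check(list):
--     """
--     Return True when there are still things to combine (there are overlapping lists remaining)
--     """
--     for out_i, outer in enumerate(list):
--         for in_i, inner in enumerate(list):
--             condition = len((set(outer)-set(inner)))
--             if out_i == in_i:
--                 continue
--             elif len(outer) - condition == 0: ## Check if there are overlapping values in outer vs inner
--                 # Overlap if not zero
--                 continue
--             else:
--                 return True
--     return False
-- ===== SOURCE B (Python) =====
-- def combine_check(list):
--     """
--     Return True when there are still things to combine (there are overlapping lists remaining)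
--     """
--     if len(list) < 2:
--         return False
--     seen = set()
--     for sub in list:
--         for x in sub:
--             if x in seen:
--                 return True
--             seen.add(x)
--     return False
-- ===== Notes on version B (the rewrite author's own statement) =====
-- stated objective: simpler
-- what changed: Replaced the quadratic all-pairs set-difference scan by a single pass over all elements with one growing 'seen' set: any element seen twice (within a list or across lists) means True, guarded by len(list) >= 2.
import Mathlib
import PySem

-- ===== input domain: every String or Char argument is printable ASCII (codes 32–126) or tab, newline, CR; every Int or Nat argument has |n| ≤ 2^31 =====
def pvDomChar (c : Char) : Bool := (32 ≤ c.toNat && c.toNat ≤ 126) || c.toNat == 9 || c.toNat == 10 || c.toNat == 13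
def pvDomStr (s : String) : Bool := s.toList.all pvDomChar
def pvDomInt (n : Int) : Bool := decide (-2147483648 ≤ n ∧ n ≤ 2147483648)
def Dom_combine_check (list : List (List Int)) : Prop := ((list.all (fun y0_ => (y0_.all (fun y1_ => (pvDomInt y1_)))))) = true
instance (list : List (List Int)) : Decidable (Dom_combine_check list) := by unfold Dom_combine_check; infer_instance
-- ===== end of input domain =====

-- B replaces A's all-pairs set-difference scan by one pass over all elements
-- with a single growing 'seen' set (objective: simpler).


-- ===== PORT A =====
-- the inner 'for in_i, inner in enumerate(list)' loop; returns true on A's 'return True'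
def ccInner (out_i : Int) (outer : List Int) : List (Int × List Int) → Bool
  | [] => false
  | (in_i, inner) :: rest =>
    let condition : Int := PySem.Set.len (PySem.Set.diff (PySem.Set.ofList outer) (PySem.Set.ofList inner))
    if out_i == in_i then ccInner out_i outer rest
    else if (outer.length : Int) - condition == 0 then ccInner out_i outer rest
    else true

-- the outer 'for out_i, outer in enumerate(list)' loop
def ccOuter (list : List (List Int)) : List (Int × List Int) → Bool
  | [] => false
  | (out_i, outer) :: rest =>
    if ccInner out_i outer (PySem.List.enumerate list) then true
    else ccOuter list rest

def combine_check (list : List (List Int)) : Bool :=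
  ccOuter list (PySem.List.enumerate list)

-- ===== PORT B =====
-- inner 'for x in sub' loop: none = 'return True' (x already seen), some = updated seen
def ccScan (seen : PySem.Set Int) : List Int → Option (PySem.Set Int)
  | [] => some seen
  | x :: xs => if PySem.Set.contains seen x then none else ccScan (PySem.Set.add seen x) xs

-- outer 'for sub in list' loop
def ccGo (seen : PySem.Set Int) : List (List Int) → Bool
  | [] => false
  | sub :: rest =>
    match ccScan seen sub with
    | none => true
    | some seen' => ccGo seen' rest

def combine_check_alt (list : List (List Int)) : Bool :=
  if list.length < 2 then false else ccGo PySem.Set.empty list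

-- ===== PRECONDITION & SPEC =====
def Spec_combine_check (list : List (List Int)) (out : Bool) : Prop := out = combine_check_alt list
instance (list : List (List Int)) (out : Bool) : Decidable (Spec_combine_check list out) := by unfold Spec_combine_check; infer_instance

-- ===== CLAIM (what is proved, stated in full; the proofs are below) =====
def Claim_equal_combine_check : Prop := ∀ (list : List (List Int)), Dom_combine_check list → Spec_combine_check list (combine_check list)

-- ===== LEMMAS AND PROOFS =====

theorem cc_bad_iff (outer inner : List Int) :
    ¬ ((outer.length : Int) -
        PySem.Set.len (PySem.Set.diff (PySem.Set.ofList outer) (PySem.Set.ofList inner)) = 0)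
      ↔ (¬ outer.Nodup ∨ ∃ x ∈ outer, x ∈ inner) := by
  rw [PySem.Set.len, sub_eq_zero]
  rw [show ((outer.length : Int) = ((PySem.Set.diff (PySem.Set.ofList outer) (PySem.Set.ofList inner)).length : Int)) ↔ (outer.length = (PySem.Set.diff (PySem.Set.ofList outer) (PySem.Set.ofList inner)).length) from Int.natCast_inj]
  constructor
  · intro h
    by_contra hcon
    push_neg at hcon
    obtain ⟨hnd, hdisj⟩ := hcon
    apply h
    rw [PySem.Set.ofList_eq_self_of_nodup outer hnd, PySem.Set.diff,
      List.filter_eq_self.mpr]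
    intro a ha
    cases hcb : (PySem.Set.ofList inner).contains a
    · rfl
    · exact absurd ((PySem.Set.mem_ofList inner a).mp
        ((PySem.Set.contains_iff _ _).mp hcb)) (hdisj a ha)
  · intro h heq
    have hle1 : (PySem.Set.diff (PySem.Set.ofList outer) (PySem.Set.ofList inner)).length ≤ (PySem.Set.ofList outer).length := List.length_filter_le _ _
    have hcard : (PySem.Set.ofList outer).length = outer.toFinset.card := by
      have hnd := PySem.Set.nodup_ofList (α := Int) outer
      rw [← List.toFinset_card_of_nodup hnd]
      congr 1
      ext a
      simp [PySem.Set.mem_ofList]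
    rcases h with hnd | ⟨x, hx, hxin⟩
    · -- duplicate in outer: |set(outer)| < len(outer)
      have hlt : outer.toFinset.card < outer.length := by
        rw [List.card_toFinset]
        rcases Nat.lt_or_ge outer.dedup.length outer.length with hl | hl
        · exact hl
        · exfalso
          apply hnd
          have hsub := List.dedup_sublist outer
          have heq := hsub.eq_of_length (le_antisymm hsub.length_le hl)
          rw [← heq]
          exact List.nodup_dedup outer
      omega
    · -- overlap: the filter drops x
      have hlt : (PySem.Set.diff (PySem.Set.ofList outer) (PySem.Set.ofList inner)).length < (PySem.Set.ofList outer).length := by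
        rw [PySem.Set.diff]
        rw [List.length_filter_lt_length_iff_exists]
        exact ⟨x, (PySem.Set.mem_ofList outer x).mpr hx, by
          simp only [Bool.not_eq_true', Bool.not_not, Bool.not_eq_false]
          rw [PySem.Set.contains_iff]
          exact (PySem.Set.mem_ofList inner x).mpr hxin⟩
      have hle2 : outer.toFinset.card ≤ outer.length := List.toFinset_card_le outer
      omega

theorem ccInner_true_iff (out_i : Int) (outer : List Int) (pairs : List (Int × List Int)) :
    ccInner out_i outer pairs = true ↔
      ∃ p ∈ pairs, p.1 ≠ out_i ∧ (¬ outer.Nodup ∨ ∃ x ∈ outer, x ∈ p.2) := by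
  induction pairs with
  | nil => simp [ccInner]
  | cons hd rest ih =>
    obtain ⟨in_i, inner⟩ := hd
    rw [ccInner]
    by_cases he : out_i = in_i
    · rw [if_pos (by simpa using he), ih]
      simp only [List.mem_cons]
      constructor
      · rintro ⟨p, hp, h⟩
        exact ⟨p, Or.inr hp, h⟩
      · rintro ⟨p, hp | hp, h⟩
        · exact absurd (hp ▸ he.symm) h.1
        · exact ⟨p, hp, h⟩
    · rw [if_neg (by simpa using he)]
      by_cases hz : (outer.length : Int) -
          PySem.Set.len (PySem.Set.diff (PySem.Set.ofList outer) (PySem.Set.ofList inner)) = 0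
      · rw [if_pos (by simpa using hz), ih]
        simp only [List.mem_cons]
        constructor
        · rintro ⟨p, hp, h⟩
          exact ⟨p, Or.inr hp, h⟩
        · rintro ⟨p, hp | hp, h⟩
          · exact absurd ((cc_bad_iff outer inner).mpr (by rw [hp] at h; exact h.2)) (not_not.mpr hz)
          · exact ⟨p, hp, h⟩
      · rw [if_neg (by simpa using hz)]
        simp only [true_iff]
        exact ⟨(in_i, inner), List.mem_cons_self, fun heq => he heq.symm,
          (cc_bad_iff outer inner).mp hz⟩

theorem ccOuter_true_iff (list : List (List Int)) (pairs : List (Int × List Int)) :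
    ccOuter list pairs = true ↔
      ∃ p ∈ pairs, ∃ q ∈ PySem.List.enumerate list, q.1 ≠ p.1 ∧
        (¬ (p.2 : List Int).Nodup ∨ ∃ x ∈ p.2, x ∈ q.2) := by
  induction pairs with
  | nil => simp [ccOuter]
  | cons hd rest ih =>
    obtain ⟨out_i, outer⟩ := hd
    rw [ccOuter]
    by_cases hin : ccInner out_i outer (PySem.List.enumerate list) = true
    · rw [if_pos hin]
      simp only [true_iff, List.mem_cons]
      obtain ⟨q, hq, hne, hbad⟩ := (ccInner_true_iff _ _ _).mp hin
      exact ⟨(out_i, outer), Or.inl rfl, q, hq, hne, hbad⟩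
    · rw [if_neg hin, ih]
      simp only [List.mem_cons]
      constructor
      · rintro ⟨p, hp, h⟩
        exact ⟨p, Or.inr hp, h⟩
      · rintro ⟨p, hp | hp, h⟩
        · apply absurd _ hin
          rw [ccInner_true_iff]
          obtain ⟨q, hq, hne, hbad⟩ := h
          subst hp
          exact ⟨q, hq, hne, hbad⟩
        · exact ⟨p, hp, h⟩

theorem ccScan_eq (xs : List Int) (seen : PySem.Set Int) :
    ccScan seen xs =
      if xs.Nodup ∧ ∀ x ∈ xs, x ∉ seen then some (PySem.Set.update seen xs) else none := by
  induction xs generalizing seen with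
  | nil => simp [ccScan, PySem.Set.update]
  | cons x xs ih =>
    rw [ccScan]
    by_cases hx : x ∈ seen
    · rw [if_pos (by simpa [PySem.Set.contains_iff] using hx),
        if_neg (by simp; intro _ _; exact fun h => absurd hx h)]
    · rw [if_neg (by simpa [PySem.Set.contains_iff] using hx), ih]
      have hupd : PySem.Set.update seen (x :: xs) = PySem.Set.update (PySem.Set.add seen x) xs := rfl
      by_cases hc : xs.Nodup ∧ ∀ y ∈ xs, y ∉ PySem.Set.add seen x
      · rw [if_pos hc, if_pos, hupd]
        refine ⟨List.nodup_cons.mpr ⟨?_, hc.1⟩, ?_⟩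
        · intro hmem
          exact (hc.2 x hmem) (by simp [PySem.Set.mem_add])
        · intro y hy
          rcases List.mem_cons.mp hy with rfl | hy
          · exact hx
          · exact fun hs => (hc.2 y hy) (by simp [PySem.Set.mem_add, hs])
      · rw [if_neg hc, if_neg]
        intro ⟨hnd, hall⟩
        apply hc
        refine ⟨hnd.of_cons, ?_⟩
        intro y hy hmem
        rw [PySem.Set.mem_add] at hmem
        rcases hmem with hs | rfl
        · exact hall y (by simp [hy]) hs
        · exact (List.nodup_cons.mp hnd).1 hy

theorem ccGo_true_iff (subs : List (List Int)) (seen : PySem.Set Int) :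
    ccGo seen subs = true ↔ ¬ (subs.flatten.Nodup ∧ ∀ x ∈ subs.flatten, x ∉ seen) := by
  induction subs generalizing seen with
  | nil => simp [ccGo]
  | cons sub rest ih =>
    rw [ccGo, ccScan_eq]
    by_cases hc : sub.Nodup ∧ ∀ x ∈ sub, x ∉ seen
    · rw [if_pos hc]
      simp only [ih]
      constructor
      · intro h ⟨hnd, hall⟩
        apply h
        rw [List.flatten_cons, List.nodup_append] at hnd
        refine ⟨hnd.2.1, ?_⟩
        intro y hy hmem
        rw [PySem.Set.mem_update] at hmem
        rcases hmem with hs | hsub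
        · exact hall y (by simp [hy]) hs
        · exact hnd.2.2 y hsub y hy rfl
      · intro h hcon
        apply h
        obtain ⟨hnd, hall⟩ := hcon
        rw [List.flatten_cons, List.nodup_append]
        refine ⟨⟨hc.1, hnd, ?_⟩, ?_⟩
        · intro a ha b hb heq
          subst heq
          exact (hall a hb) (by rw [PySem.Set.mem_update]; right; exact ha)
        · intro y hy
          simp only [List.mem_append] at hy
          rcases hy with hy | hy
          · exact hc.2 y hy
          · exact fun hs => (hall y hy) (by rw [PySem.Set.mem_update]; left; exact hs)
    · rw [if_neg hc]
      simp only [true_iff]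
      intro ⟨hnd, hall⟩
      apply hc
      rw [List.flatten_cons, List.nodup_append] at hnd
      exact ⟨hnd.1, fun y hy => hall y (by simp [hy])⟩

theorem cc_A_iff (list : List (List Int)) :
    combine_check list = true ↔ (2 ≤ list.length ∧ ¬ list.flatten.Nodup) := by
  rw [combine_check, ccOuter_true_iff]
  constructor
  · rintro ⟨p, hp, q, hq, hne, hbad⟩
    rw [PySem.List.mem_enumerate_iff] at hp hq
    obtain ⟨k, hk, rfl⟩ := hp
    obtain ⟨l, hl, rfl⟩ := hq
    simp only at hne hbad
    have hkl : k ≠ l := fun h => hne (by rw [h])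
    refine ⟨by omega, ?_⟩
    intro hnd
    rw [List.nodup_flatten] at hnd
    rcases hbad with hbad | ⟨x, hx1, hx2⟩
    · exact hbad (hnd.1 _ (List.getElem_mem hk))
    · have hpair := List.pairwise_iff_getElem.mp hnd.2
      rcases Nat.lt_or_ge k l with hlt | hge
      · exact hpair k l hk hl hlt hx1 hx2
      · exact hpair l k hl hk (by omega) hx2 hx1
  · rintro ⟨hlen, hnd⟩
    rw [List.nodup_flatten, not_and_or] at hnd
    rcases hnd with hnd | hnd
    · push_neg at hnd
      obtain ⟨sub, hsub, hsnd⟩ := hnd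
      obtain ⟨k, hk, rfl⟩ := List.mem_iff_getElem.mp hsub
      have hj : (if k = 0 then 1 else 0) < list.length := by split <;> omega
      refine ⟨(k, list[k]), ?_, ((if k = 0 then 1 else 0 : Nat), list[if k = 0 then 1 else 0]), ?_, ?_, Or.inl hsnd⟩
      · rw [PySem.List.mem_enumerate_iff]
        exact ⟨k, hk, by simp⟩
      · rw [PySem.List.mem_enumerate_iff]
        exact ⟨_, hj, by simp⟩
      · simp only [ne_eq, Int.natCast_inj]
        split <;> omega
    · rw [List.pairwise_iff_getElem] at hnd
      push_neg at hnd
      obtain ⟨i, j, hi, hj, hij, hdisj⟩ := hnd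
      rw [List.Disjoint] at hdisj
      push_neg at hdisj
      obtain ⟨x, hx1, hx2⟩ := hdisj
      refine ⟨(i, list[i]), ?_, ((j : Nat), list[j]), ?_, ?_, Or.inr ⟨x, hx1, hx2.1⟩⟩
      · rw [PySem.List.mem_enumerate_iff]; exact ⟨i, hi, by simp⟩
      · rw [PySem.List.mem_enumerate_iff]; exact ⟨j, hj, by simp⟩
      · simp only [ne_eq, Int.natCast_inj]; omega

theorem cc_B_iff (list : List (List Int)) :
    combine_check_alt list = true ↔ (2 ≤ list.length ∧ ¬ list.flatten.Nodup) := by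
  rw [combine_check_alt]
  by_cases h : list.length < 2
  · rw [if_pos h]
    simp only [Bool.false_eq_true, false_iff, not_and]
    omega
  · rw [if_neg h, ccGo_true_iff]
    constructor
    · intro hn
      exact ⟨by omega, fun hnd => hn ⟨hnd, by simp [PySem.Set.empty]⟩⟩
    · rintro ⟨_, hnd⟩ ⟨h1, _⟩
      exact hnd h1

-- ===== VERDICT (by name: the statement is the Claim_ definition above) =====
theorem combine_check_spec : Claim_equal_combine_check := by
  intro list _
  unfold Spec_combine_check
  rcases h : combine_check_alt list with _ | _
  · rcases h2 : combine_check list with _ | _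
    · rfl
    · exact absurd ((cc_B_iff list).mpr ((cc_A_iff list).mp h2)) (by simp [h])
  · exact (cc_A_iff list).mpr ((cc_B_iff list).mp h)
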